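-- pv_equiv track=rewrite | github.com/linhnt31/Python | Competitive Progamming/CodeSignal/Tourements/8_4_2019.py | differentValues
-- ===== SOURCE A (Python) =====
-- def differentValues(a, d):
--
--     best = -1
--     for i in range(len(a)):
--         for j in range(i + 1, len(a)):
--             diff = abs(a[j] - a[i ])
--             if diff <= d and best < diff:
--                 best = diff
--
--     return best
-- ===== SOURCE B (Python) =====
-- def differentValues(a, d):
--     # Sort, then for each position binary-search the largest later element <= s[i] + d.
--     s = sorted(a)
--     n = len(s)
--     best = -1
--     for i in range(n):
--         lo = i + 1
--         hi = n
--         while lo < hi: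
--             mid = (lo + hi) // 2
--             if s[mid] <= s[i] + d:
--                 lo = mid + 1
--             else:
--                 hi = mid
--         if lo > i + 1:
--             c = s[lo - 1] - s[i]
--             if c > best:
--                 best = c
--     return best
-- ===== Notes on version B (the rewrite author's own statement) =====
-- stated objective: faster
-- what changed: Replaced the O(n^2) scan over all index pairs by sort-then-binary-search: for each element of the sorted list, a hand-written bisect finds the largest later element within d, and the best such gap is the answer.
import Mathlib
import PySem

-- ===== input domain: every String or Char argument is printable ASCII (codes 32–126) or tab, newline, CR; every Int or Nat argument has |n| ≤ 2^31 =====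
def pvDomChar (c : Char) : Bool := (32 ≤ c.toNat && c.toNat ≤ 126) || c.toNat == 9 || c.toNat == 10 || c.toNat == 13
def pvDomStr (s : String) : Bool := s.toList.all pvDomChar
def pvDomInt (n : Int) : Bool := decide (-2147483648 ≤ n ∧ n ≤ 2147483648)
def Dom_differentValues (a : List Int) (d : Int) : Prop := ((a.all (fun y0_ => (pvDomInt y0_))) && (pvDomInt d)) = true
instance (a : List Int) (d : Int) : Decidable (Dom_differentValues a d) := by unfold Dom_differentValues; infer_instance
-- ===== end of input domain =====

-- B replaces A's O(n^2) scan over all index pairs by sort-then-binary-search (objective: faster).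

-- ===== PORT A =====
def differentValues (a : List Int) (d : Int) : Int :=
  (PySem.List.pyRange 0 (a.length : Int) 1).foldl (fun best i =>
    (PySem.List.pyRange (i + 1) (a.length : Int) 1).foldl (fun best j =>
      let diff := |PySem.List.pyGetD a j 0 - PySem.List.pyGetD a i 0|
      if diff ≤ d ∧ best < diff then diff else best) best) (-1)

-- ===== PORT B =====
-- the hand-written 'while lo < hi' binary-search loop of Source B
def bisLoop (s : List Int) (t : Int) (lo hi : Int) : Int :=
  if h : lo < hi then
    let mid := PySem.Int.floordiv (lo + hi) 2
    if PySem.List.pyGetD s mid 0 ≤ t then bisLoop s t (mid + 1) hi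
    else bisLoop s t lo mid
  else lo
termination_by (hi - lo).toNat
decreasing_by
  · have h1 := PySem.Int.floordiv_two_mid_bounds (le_of_lt h)
    have h2 : PySem.Int.floordiv (lo + hi) 2 < hi :=
      (PySem.Int.floordiv_lt_iff_lt_mul (by omega : (0:Int) < 2)).mpr (by omega)
    omega
  · have h2 : PySem.Int.floordiv (lo + hi) 2 < hi :=
      (PySem.Int.floordiv_lt_iff_lt_mul (by omega : (0:Int) < 2)).mpr (by omega)
    omega

def differentValues_alt (a : List Int) (d : Int) : Int :=
  let s := PySem.List.sorted a (fun x => x) false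
  let n : Int := s.length
  (PySem.List.pyRange 0 n 1).foldl (fun best i =>
    let lo := bisLoop s (PySem.List.pyGetD s i 0 + d) (i + 1) n
    if lo > i + 1 then
      let c := PySem.List.pyGetD s (lo - 1) 0 - PySem.List.pyGetD s i 0
      if c > best then c else best
    else best) (-1)

-- ===== PRECONDITION & SPEC =====
def Spec_differentValues (a : List Int) (d : Int) (out : Int) : Prop := out = differentValues_alt a d
instance (a : List Int) (d : Int) (out : Int) : Decidable (Spec_differentValues a d out) := by unfold Spec_differentValues; infer_instance

-- ===== CLAIM (what is proved, stated in full; the proofs are below) =====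
def Claim_equal_differentValues : Prop := ∀ (a : List Int) (d : Int), Dom_differentValues a d → Spec_differentValues a d (differentValues a d)

-- ===== LEMMAS AND PROOFS =====

-- 'v is |l[j] - l[i]| for some pair of positions i < j, and v ≤ d'
def pvOkPair (l : List Int) (d v : Int) : Prop :=
  ∃ i j : Int, 0 ≤ i ∧ i < j ∧ j < (l.length : Int) ∧
    v = |PySem.List.pyGetD l j 0 - PySem.List.pyGetD l i 0| ∧ v ≤ d

-- generic running-max foldl of shape 'if P x and b < f x: b = f x'
theorem pv_foldmax {α : Type} (xs : List α) (f : α → Int) (P : α → Prop) [DecidablePred P]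
    (b0 : Int) :
    b0 ≤ xs.foldl (fun b x => if P x ∧ b < f x then f x else b) b0 ∧
    (xs.foldl (fun b x => if P x ∧ b < f x then f x else b) b0 = b0 ∨
      ∃ x ∈ xs, P x ∧ xs.foldl (fun b x => if P x ∧ b < f x then f x else b) b0 = f x) ∧
    (∀ x ∈ xs, P x → f x ≤ xs.foldl (fun b x => if P x ∧ b < f x then f x else b) b0) := by
  induction xs generalizing b0 with
  | nil => simp
  | cons y ys ih =>
    simp only [List.foldl_cons]
    by_cases hy : P y ∧ b0 < f y
    · simp only [if_pos hy]
      rcases ih (f y) with ⟨h1, h2, h3⟩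
      refine ⟨le_trans (le_of_lt hy.2) h1, ?_, ?_⟩
      · rcases h2 with h2 | ⟨x, hx, hPx, hval⟩
        · exact Or.inr ⟨y, by simp, hy.1, h2⟩
        · exact Or.inr ⟨x, by simp [hx], hPx, hval⟩
      · intro x hx hPx
        rcases List.mem_cons.mp hx with rfl | hx'
        · exact h1
        · exact h3 x hx' hPx
    · simp only [if_neg hy]
      rcases ih b0 with ⟨h1, h2, h3⟩
      refine ⟨h1, ?_, ?_⟩
      · rcases h2 with h2 | ⟨x, hx, hPx, hval⟩
        · exact Or.inl h2
        · exact Or.inr ⟨x, by simp [hx], hPx, hval⟩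
      · intro x hx hPx
        rcases List.mem_cons.mp hx with rfl | hx'
        · have hnl : ¬ b0 < f x := fun hlt => hy ⟨hPx, hlt⟩
          exact le_trans (not_lt.mp hnl) h1
        · exact h3 x hx' hPx

theorem pv_foldl_ge {α : Type} (xs : List α) (F : Int → α → Int)
    (hg : ∀ b x, x ∈ xs → b ≤ F b x) (b0 : Int) : b0 ≤ xs.foldl F b0 := by
  induction xs generalizing b0 with
  | nil => simp
  | cons y ys ih =>
    simp only [List.foldl_cons]
    exact le_trans (hg b0 y (by simp)) (ih (fun b x hx => hg b x (by simp [hx])) _)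

theorem pv_foldl_opt {α : Type} (xs : List α) (F : Int → α → Int) (Q : Int → Prop)
    (h : ∀ b x, x ∈ xs → F b x = b ∨ Q (F b x)) (b0 : Int) :
    xs.foldl F b0 = b0 ∨ Q (xs.foldl F b0) := by
  induction xs generalizing b0 with
  | nil => simp
  | cons y ys ih =>
    simp only [List.foldl_cons]
    rcases ih (fun b x hx => h b x (by simp [hx])) (F b0 y) with h2 | h2
    · rcases h b0 y (by simp) with h3 | h3
      · exact Or.inl (h2.trans h3)
      · exact Or.inr (by rw [h2]; exact h3)
    · exact Or.inr h2

theorem pv_foldl_dom {α : Type} (xs : List α) (F : Int → α → Int)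
    (hg : ∀ b x, x ∈ xs → b ≤ F b x) (R : α → Int → Prop)
    (h : ∀ b x, x ∈ xs → ∀ v, R x v → v ≤ F b x) (b0 : Int) :
    ∀ x ∈ xs, ∀ v, R x v → v ≤ xs.foldl F b0 := by
  induction xs generalizing b0 with
  | nil => simp
  | cons y ys ih =>
    intro x hx v hR
    simp only [List.foldl_cons]
    rcases List.mem_cons.mp hx with rfl | hx'
    · exact le_trans (h b0 x (by simp) v hR)
        (pv_foldl_ge ys F (fun b z hz => hg b z (by simp [hz])) _)
    · exact ih (fun b z hz => hg b z (by simp [hz]))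
        (fun b z hz => h b z (by simp [hz])) (F b0 y) x hx' v hR

-- membership form of pvOkPair, used for permutation invariance
theorem pv_getD_nat (l : List Int) (n : Nat) (h : n < l.length) :
    PySem.List.pyGetD l (n : Int) 0 = l[n] := by
  rw [PySem.List.pyGetD_eq_getElem l 0 (by positivity) (by exact_mod_cast h)]
  simp

theorem pv_okPair_iff_mem (l : List Int) (d v : Int) :
    pvOkPair l d v ↔ ∃ x ∈ l, ∃ y ∈ l.erase x, v = |y - x| ∧ v ≤ d := by
  constructor
  · rintro ⟨i, j, hi0, hij, hjl, hv, hvd⟩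
    have hj0 : (0:Int) ≤ j := by omega
    have hjN : j.toNat < l.length := by omega
    have hiN : i.toNat < l.length := by omega
    rw [PySem.List.pyGetD_eq_getElem l 0 hj0 hjl,
        PySem.List.pyGetD_eq_getElem l 0 hi0 (by omega)] at hv
    set x := l[i.toNat] with hxdef
    set y := l[j.toNat] with hydef
    refine ⟨x, hxdef ▸ List.getElem_mem _, y, ?_, hv, hvd⟩
    have hlt : i.toNat < (l.take j.toNat).length := by
      simp [List.length_take]; omega
    have hx_take : l[i.toNat] ∈ l.take j.toNat := by
      have hgt : (l.take j.toNat)[i.toNat]'hlt = l[i.toNat] := List.getElem_take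
      exact hgt ▸ List.getElem_mem hlt
    have hd : l.drop j.toNat = l[j.toNat] :: l.drop (j.toNat + 1) :=
      List.drop_eq_getElem_cons hjN
    have hsplit : l = l.take j.toNat ++ l[j.toNat] :: l.drop (j.toNat + 1) := by
      conv_lhs => rw [← List.take_append_drop j.toNat l]
      rw [hd]
    conv_lhs => rw [hsplit]
    rw [List.erase_append_left _ hx_take]
    exact List.mem_append_right _ (List.mem_cons_self ..)
  · rintro ⟨x, hx, y, hy, hv, hvd⟩
    obtain ⟨l₁, l₂, hxl₁, hl, herase⟩ := List.exists_erase_eq hx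
    rw [herase] at hy
    subst hl
    have ex : PySem.List.pyGetD (l₁ ++ x :: l₂) (l₁.length : Int) 0 = x := by
      rw [pv_getD_nat _ _ (by simp)]
      rw [List.getElem_append_right (le_refl l₁.length)]
      simp
    rcases List.mem_append.mp hy with hy1 | hy2
    · obtain ⟨p, hp, hyp⟩ := List.mem_iff_getElem.mp hy1
      have ey : PySem.List.pyGetD (l₁ ++ x :: l₂) (p : Int) 0 = y := by
        rw [pv_getD_nat _ _ (by simp only [List.length_append, List.length_cons]; omega)]
        rw [List.getElem_append_left hp]
        exact hyp
      refine ⟨(p : Int), (l₁.length : Int), by positivity, by exact_mod_cast hp,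
        by simp, ?_, hvd⟩
      rw [ex, ey, hv, abs_sub_comm]
    · obtain ⟨q, hq, hyq⟩ := List.mem_iff_getElem.mp hy2
      have ey : PySem.List.pyGetD (l₁ ++ x :: l₂) ((l₁.length + 1 + q : Nat) : Int) 0 = y := by
        rw [pv_getD_nat _ _ (by simp; omega)]
        rw [List.getElem_append_right (by omega : l₁.length ≤ l₁.length + 1 + q)]
        have hidx : l₁.length + 1 + q - l₁.length = q + 1 := by omega
        simp only [hidx, List.getElem_cons_succ]
        exact hyq
      refine ⟨(l₁.length : Int), ((l₁.length + 1 + q : Nat) : Int), by positivity,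
        by push_cast; omega, by simp; omega, ?_, hvd⟩
      rw [ex, ey, hv]

theorem pv_okPair_perm {l l' : List Int} (p : l.Perm l') (d v : Int) :
    pvOkPair l d v ↔ pvOkPair l' d v := by
  rw [pv_okPair_iff_mem, pv_okPair_iff_mem]
  constructor
  all_goals
    rintro ⟨x, hx, y, hy, hv⟩
    exact ⟨x, by first | exact p.mem_iff.mp hx | exact p.mem_iff.mpr hx, y,
      by first | exact (p.erase x).mem_iff.mp hy | exact (p.erase x).mem_iff.mpr hy, hv⟩

-- sorted list: values are monotone in the (integer) index
theorem pv_mono {s : List Int} (hs : s.Pairwise (· ≤ ·)) {p q : Int}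
    (hp : 0 ≤ p) (hpq : p ≤ q) (hq : q < (s.length : Int)) :
    PySem.List.pyGetD s p 0 ≤ PySem.List.pyGetD s q 0 := by
  rcases eq_or_lt_of_le hpq with rfl | hlt
  · exact le_refl _
  · rw [PySem.List.pyGetD_eq_getElem s 0 hp (by omega),
        PySem.List.pyGetD_eq_getElem s 0 (by omega) hq]
    exact List.pairwise_iff_getElem.mp hs p.toNat q.toNat (by omega) (by omega) (by omega)

-- the binary-search loop: specification on a sorted list
theorem pv_bisLoop_spec (s : List Int) (hs : s.Pairwise (· ≤ ·)) (t lo hi : Int)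
    (hlo : 0 ≤ lo) (hhi : hi ≤ (s.length : Int)) (hlh : lo ≤ hi) :
    lo ≤ bisLoop s t lo hi ∧ bisLoop s t lo hi ≤ hi ∧
    (∀ k : Int, lo ≤ k → k < bisLoop s t lo hi → PySem.List.pyGetD s k 0 ≤ t) ∧
    (∀ k : Int, bisLoop s t lo hi ≤ k → k < hi → t < PySem.List.pyGetD s k 0) := by
  suffices H : ∀ m : Nat, ∀ lo hi : Int, (hi - lo).toNat ≤ m → 0 ≤ lo → hi ≤ (s.length : Int) →
      lo ≤ hi →
      lo ≤ bisLoop s t lo hi ∧ bisLoop s t lo hi ≤ hi ∧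
      (∀ k : Int, lo ≤ k → k < bisLoop s t lo hi → PySem.List.pyGetD s k 0 ≤ t) ∧
      (∀ k : Int, bisLoop s t lo hi ≤ k → k < hi → t < PySem.List.pyGetD s k 0) from
    H (hi - lo).toNat lo hi le_rfl hlo hhi hlh
  intro m
  induction m with
  | zero =>
    intro lo hi hm h0 hh hlh
    have heq : ¬ lo < hi := by omega
    rw [bisLoop]
    simp only [dif_neg heq]
    exact ⟨le_rfl, hlh, fun k h1 h2 => absurd (lt_of_le_of_lt h1 h2) (lt_irrefl _),
      fun k h1 h2 => absurd (lt_of_le_of_lt h1 h2) heq⟩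
  | succ m ih =>
    intro lo hi hm h0 hh hlh
    by_cases h : lo < hi
    · rw [bisLoop]
      simp only [dif_pos h]
      have hb := PySem.Int.floordiv_two_mid_bounds (le_of_lt h)
      have hmlt : PySem.Int.floordiv (lo + hi) 2 < hi :=
        (PySem.Int.floordiv_lt_iff_lt_mul (by omega : (0:Int) < 2)).mpr (by omega)
      set mid := PySem.Int.floordiv (lo + hi) 2 with hmid
      by_cases hc : PySem.List.pyGetD s mid 0 ≤ t
      · simp only [if_pos hc]
        obtain ⟨i1, i2, i3, i4⟩ := ih (mid + 1) hi (by omega) (by omega) hh (by omega)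
        refine ⟨by omega, i2, ?_, i4⟩
        intro k hk1 hk2
        by_cases hkm : mid + 1 ≤ k
        · exact i3 k hkm hk2
        · exact le_trans (pv_mono hs (by omega) (by omega : k ≤ mid) (by omega)) hc
      · simp only [if_neg hc]
        obtain ⟨i1, i2, i3, i4⟩ := ih lo mid (by omega) h0 (by omega) (by omega)
        refine ⟨i1, by omega, i3, ?_⟩
        intro k hk1 hk2
        by_cases hkm : k < mid
        · exact i4 k hk1 hkm
        · exact lt_of_lt_of_le (not_le.mp hc) (pv_mono hs (by omega) (by omega : mid ≤ k) (by omega))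
    · rw [bisLoop]
      simp only [dif_neg h]
      exact ⟨le_rfl, hlh, fun k h1 h2 => absurd (lt_of_le_of_lt h1 h2) (lt_irrefl _),
        fun k h1 h2 => absurd (lt_of_le_of_lt h1 h2) h⟩

-- characterisation of A's nested loops: result is -1 or an admissible diff, and dominates all of them
theorem pv_A_char (a : List Int) (d : Int) :
    -1 ≤ differentValues a d ∧
    (differentValues a d = -1 ∨ pvOkPair a d (differentValues a d)) ∧
    (∀ v, pvOkPair a d v → v ≤ differentValues a d) := by
  have key := fun (b i : Int) => pv_foldmax (PySem.List.pyRange (i + 1) (a.length : Int) 1)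
    (fun j => |PySem.List.pyGetD a j 0 - PySem.List.pyGetD a i 0|)
    (fun j => |PySem.List.pyGetD a j 0 - PySem.List.pyGetD a i 0| ≤ d) b
  have hdef : differentValues a d = (PySem.List.pyRange 0 (a.length : Int) 1).foldl
      (fun b i => (PySem.List.pyRange (i + 1) (a.length : Int) 1).foldl
        (fun b j => if |PySem.List.pyGetD a j 0 - PySem.List.pyGetD a i 0| ≤ d ∧
            b < |PySem.List.pyGetD a j 0 - PySem.List.pyGetD a i 0| then
          |PySem.List.pyGetD a j 0 - PySem.List.pyGetD a i 0| else b) b) (-1) := rfl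
  rw [hdef]
  set F : Int → Int → Int := fun b i => (PySem.List.pyRange (i + 1) (a.length : Int) 1).foldl
      (fun b j => if |PySem.List.pyGetD a j 0 - PySem.List.pyGetD a i 0| ≤ d ∧
          b < |PySem.List.pyGetD a j 0 - PySem.List.pyGetD a i 0| then
        |PySem.List.pyGetD a j 0 - PySem.List.pyGetD a i 0| else b) b with hF
  have hg : ∀ (b i : Int), i ∈ PySem.List.pyRange 0 (a.length : Int) 1 → b ≤ F b i :=
    fun b i _ => (key b i).1
  refine ⟨pv_foldl_ge _ F hg (-1), ?_, ?_⟩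
  · refine pv_foldl_opt _ F (pvOkPair a d) ?_ (-1)
    intro b i hi
    rcases (key b i).2.1 with h | ⟨j, hj, hPj, hval⟩
    · exact Or.inl h
    · refine Or.inr ?_
      obtain ⟨hj1, hj2⟩ := PySem.List.mem_pyRange_one.mp hj
      obtain ⟨hi1, hi2⟩ := PySem.List.mem_pyRange_one.mp hi
      have hcand : pvOkPair a d (|PySem.List.pyGetD a j 0 - PySem.List.pyGetD a i 0|) :=
        ⟨i, j, hi1, by omega, hj2, rfl, hPj⟩
      rw [← hval] at hcand
      exact hcand
  · rintro v ⟨i, j, hi0, hij, hjn, hv, hvd⟩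
    refine pv_foldl_dom _ F hg
      (fun i v => ∃ j : Int, i < j ∧ j < (a.length : Int) ∧
        v = |PySem.List.pyGetD a j 0 - PySem.List.pyGetD a i 0| ∧ v ≤ d) ?_ (-1) i
      (PySem.List.mem_pyRange_one.mpr ⟨hi0, by omega⟩) v ⟨j, hij, hjn, hv, hvd⟩
    rintro b i _ v ⟨j, hij, hjn, hv, hvd⟩
    have hle := (key b i).2.2 j (PySem.List.mem_pyRange_one.mpr ⟨by omega, hjn⟩)
      (by rw [← hv]; exact hvd)
    rw [hv]
    exact hle

-- characterisation of B's loop: same three properties, over the sorted list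
-- the bisect call, candidate value and candidate test of B, named for the proofs
def pvBi (s : List Int) (d n i : Int) : Int :=
  bisLoop s (PySem.List.pyGetD s i 0 + d) (i + 1) n

def pvF (s : List Int) (d n i : Int) : Int :=
  PySem.List.pyGetD s (pvBi s d n i - 1) 0 - PySem.List.pyGetD s i 0

theorem pv_B_char (a : List Int) (d : Int) :
    -1 ≤ differentValues_alt a d ∧
    (differentValues_alt a d = -1 ∨
      pvOkPair (PySem.List.sorted a (fun x => x) false) d (differentValues_alt a d)) ∧
    (∀ v, pvOkPair (PySem.List.sorted a (fun x => x) false) d v → v ≤ differentValues_alt a d) := by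
  set s := PySem.List.sorted a (fun x => x) false with hsdef
  have hs : List.Pairwise (· ≤ ·) s := PySem.List.sorted_pairwise a (fun x => x)
  set n : Int := (s.length : Int) with hn
  have key := fun (b : Int) => pv_foldmax (PySem.List.pyRange 0 n 1)
    (pvF s d n) (fun i => pvBi s d n i > i + 1) b
  have hdef : differentValues_alt a d = (PySem.List.pyRange 0 n 1).foldl
      (fun b i => if pvBi s d n i > i + 1 ∧ b < pvF s d n i then pvF s d n i else b) (-1) := by
    show (PySem.List.pyRange 0 n 1).foldl
      (fun best i =>
        if pvBi s d n i > i + 1 then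
          if pvF s d n i > best then pvF s d n i else best
        else best) (-1) = _
    apply PySem.List.foldl_congr_mem
    intro acc x _
    split_ifs <;> first | rfl | omega
  rw [hdef]
  have hbs : ∀ i : Int, 0 ≤ i → i < n →
      i + 1 ≤ pvBi s d n i ∧ pvBi s d n i ≤ n ∧
      (∀ k : Int, i + 1 ≤ k → k < pvBi s d n i →
        PySem.List.pyGetD s k 0 ≤ PySem.List.pyGetD s i 0 + d) ∧
      (∀ k : Int, pvBi s d n i ≤ k → k < n →
        PySem.List.pyGetD s i 0 + d < PySem.List.pyGetD s k 0) :=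
    fun i h0 h1 => pv_bisLoop_spec s hs (PySem.List.pyGetD s i 0 + d) (i + 1) n
      (by omega) (by rw [hn]) (by omega)
  have hg : ∀ (b i : Int), i ∈ PySem.List.pyRange 0 n 1 →
      b ≤ (fun b i => if pvBi s d n i > i + 1 ∧ b < pvF s d n i then pvF s d n i else b) b i := by
    intro b i _
    show b ≤ if pvBi s d n i > i + 1 ∧ b < pvF s d n i then pvF s d n i else b
    split_ifs with h
    · omega
    · exact le_refl b
  refine ⟨pv_foldl_ge _ _ hg (-1), ?_, ?_⟩
  · refine pv_foldl_opt _ _ (pvOkPair s d) ?_ (-1)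
    intro b i hi
    show (if pvBi s d n i > i + 1 ∧ b < pvF s d n i then pvF s d n i else b) = b ∨
      pvOkPair s d (if pvBi s d n i > i + 1 ∧ b < pvF s d n i then pvF s d n i else b)
    split_ifs with h
    · right
      obtain ⟨hi1, hi2⟩ := PySem.List.mem_pyRange_one.mp hi
      obtain ⟨b1, b2, b3, b4⟩ := hbs i hi1 hi2
      refine ⟨i, pvBi s d n i - 1, hi1, by omega, by rw [← hn]; omega, ?_, ?_⟩
      · have hmono := pv_mono hs hi1 (show i ≤ pvBi s d n i - 1 by omega)
          (show pvBi s d n i - 1 < (s.length : Int) by omega)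
        rw [pvF, abs_of_nonneg (sub_nonneg.mpr hmono)]
      · have := b3 (pvBi s d n i - 1) (by omega) (by omega)
        rw [pvF]
        omega
    · exact Or.inl rfl
  · rintro v ⟨i, j, hi0, hij, hjn, hv, hvd⟩
    rw [← hn] at hjn
    refine pv_foldl_dom _ _ hg
      (fun i v => ∃ j : Int, i < j ∧ j < n ∧
        v = |PySem.List.pyGetD s j 0 - PySem.List.pyGetD s i 0| ∧ v ≤ d) ?_ (-1) i
      (PySem.List.mem_pyRange_one.mpr ⟨hi0, by omega⟩) v ⟨j, hij, hjn, hv, hvd⟩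
    rintro b i hi v ⟨j, hij, hjn, hv, hvd⟩
    obtain ⟨hi1, hi2⟩ := PySem.List.mem_pyRange_one.mp hi
    obtain ⟨b1, b2, b3, b4⟩ := hbs i hi1 hi2
    have hmono := pv_mono hs (by omega : (0:Int) ≤ i) (le_of_lt hij) (by rw [← hn]; omega)
    rw [abs_of_nonneg (sub_nonneg.mpr hmono)] at hv
    have hjlt : j < pvBi s d n i := by
      by_contra hge
      have := b4 j (not_lt.mp hge) hjn
      omega
    have hP : pvBi s d n i > i + 1 := by omega
    have hmono2 := pv_mono hs (by omega : (0:Int) ≤ j)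
      (by omega : j ≤ pvBi s d n i - 1) (by rw [← hn]; omega)
    have hvf : v ≤ pvF s d n i := by rw [pvF]; omega
    show v ≤ if pvBi s d n i > i + 1 ∧ b < pvF s d n i then pvF s d n i else b
    split_ifs with h
    · omega
    · rcases not_and_or.mp h with h | h <;> omega

-- ===== VERDICT (by name: the statement is the Claim_ definition above) =====
theorem differentValues_spec : Claim_equal_differentValues := by
  intro a d _
  unfold Spec_differentValues
  have hperm : (PySem.List.sorted a (fun x => x) false).Perm a := PySem.List.sorted_perm a _ _
  obtain ⟨hA1, hA2, hA3⟩ := pv_A_char a d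
  obtain ⟨hB1, hB2, hB3⟩ := pv_B_char a d
  have hiff := fun v => pv_okPair_perm hperm d v
  apply le_antisymm
  · rcases hA2 with h | h
    · omega
    · exact hB3 _ ((hiff _).mpr h)
  · rcases hB2 with h | h
    · omega
    · exact hA3 _ ((hiff _).mp h)
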